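-- pv_equiv track=rewrite | github.com/chay116/techblog | scripts/inject_frontmatter.py | strip_blockquote_header
-- ===== SOURCE A (Python) =====
-- def find_blockquote_end(lines: list[str]) -> int | None:
--     """Find the end index of the blockquote+hr block after the title.
--
--     Returns the index of the line AFTER the `---` that follows the blockquote,
--     or None if no such block is found.
--     """
--     in_blockquote = False
--     for i, raw in enumerate(lines):
--         ln = raw.strip()
--         # Skip empty lines and the title line
--         if not ln or ln.startswith("# "):
--             continue
--         if ln.startswith(">"):
--             in_blockquote = True
--             continue
--         if in_blockquote and ln == "---":
--             return i + 1  # line after the ---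
--         break
--     return None
--
-- def strip_blockquote_header(lines: list[str]) -> list[str]:
--     """Remove the Type A blockquote+hr block, keeping the # title and body."""
--     end = find_blockquote_end(lines)
--     if end is None:
--         return lines
--
--     # Keep everything before blockquote and after the hr
--     result = []
--     in_blockquote = False
--     for i, raw in enumerate(lines):
--         if i >= end:
--             result.append(raw)
--             continue
--         ln = raw.strip()
--         if ln.startswith(">"):
--             in_blockquote = True
--             continue
--         if in_blockquote and ln == "---":
--             continue
--         if in_blockquote and not ln:
--             # Skip blank lines within blockquote region
--             continue
--         result.append(raw)
--     return result
-- ===== SOURCE B (Python) =====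
-- def strip_blockquote_header(lines: list[str]) -> list[str]:
--     """Remove the Type A blockquote+hr block, keeping the # title and body.
--
--     Single-pass state machine with an output accumulator: state 0 (before the
--     blockquote) keeps blank/title lines, state 1 (inside it) keeps only title
--     lines, state 2 (after the closing ---) keeps everything.  Any line that
--     breaks the pattern means there is no block: return lines unchanged.
--     """
--     out = []
--     state = 0  # 0 = before blockquote, 1 = inside, 2 = past the ---
--     for raw in lines:
--         if state == 2:
--             out.append(raw)
--             continue
--         ln = raw.strip()
--         if state == 0:
--             if not ln or ln.startswith("# "):
--                 out.append(raw)
--             elif ln.startswith(">"):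
--                 state = 1
--             else:
--                 return lines
--         else:  # state == 1
--             if ln == "---":
--                 state = 2
--             elif ln.startswith("# "):
--                 out.append(raw)
--             elif not ln or ln.startswith(">"):
--                 pass
--             else:
--                 return lines
--     return out if state == 2 else lines
-- ===== Notes on version B (the rewrite author's own statement) =====
-- stated objective: simpler
-- what changed: B is a single-pass state machine (before-block / in-block / past-block) with an output accumulator, returning lines unchanged the moment the pattern fails, instead of A's two staged passes (find the end index of the block, then re-scan and re-classify every line against that index).
import Mathlib
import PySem

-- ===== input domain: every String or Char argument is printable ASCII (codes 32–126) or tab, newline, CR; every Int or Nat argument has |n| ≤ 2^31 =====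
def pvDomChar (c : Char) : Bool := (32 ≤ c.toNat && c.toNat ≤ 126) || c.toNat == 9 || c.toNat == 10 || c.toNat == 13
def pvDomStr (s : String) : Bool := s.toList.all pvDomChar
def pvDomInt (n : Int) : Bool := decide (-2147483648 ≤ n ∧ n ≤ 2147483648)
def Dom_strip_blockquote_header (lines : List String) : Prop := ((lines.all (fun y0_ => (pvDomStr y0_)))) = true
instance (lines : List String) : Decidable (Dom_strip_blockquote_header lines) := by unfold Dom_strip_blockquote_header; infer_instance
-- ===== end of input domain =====

-- B replaces A's two staged passes (find the block's end index, then re-scan and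
-- re-classify every line) by one single-pass state machine with an accumulator;
-- objective: simpler.

-- ===== PORT A =====
-- find_blockquote_end: loop with enumerate, index i, in_blockquote flag
def pvFindEnd : List String → Nat → Bool → Option Nat
  | [], _, _ => none
  | raw :: rest, i, inbq =>
    let ln := PySem.Str.strip raw
    if ln = "" ∨ PySem.Str.startswith ln "# " = true then pvFindEnd rest (i+1) inbq
    else if PySem.Str.startswith ln ">" = true then pvFindEnd rest (i+1) true
    else if inbq = true ∧ ln = "---" then some (i+1)
    else none

-- A's second pass: rebuild result, skipping blockquote parts before index e
def pvStripLoop : List String → Nat → Nat → Bool → List String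
  | [], _, _, _ => []
  | raw :: rest, i, e, inbq =>
    if e ≤ i then raw :: pvStripLoop rest (i+1) e inbq
    else
      let ln := PySem.Str.strip raw
      if PySem.Str.startswith ln ">" = true then pvStripLoop rest (i+1) e true
      else if inbq = true ∧ ln = "---" then pvStripLoop rest (i+1) e inbq
      else if inbq = true ∧ ln = "" then pvStripLoop rest (i+1) e inbq
      else raw :: pvStripLoop rest (i+1) e inbq

def strip_blockquote_header (lines : List String) : List String :=
  match pvFindEnd lines 0 false with
  | none => lines
  | some e => pvStripLoop lines 0 e false

-- ===== PORT B =====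
-- Source B's for-loop: out accumulator and state 0/1/2; 'return lines' = none
def pvBGo : List String → List String → Nat → Option (List String)
  | [], out, st => if st = 2 then some out else none
  | raw :: rest, out, st =>
    if st = 2 then pvBGo rest (out ++ [raw]) st
    else
      let ln := PySem.Str.strip raw
      if st = 0 then
        if ln = "" ∨ PySem.Str.startswith ln "# " = true then pvBGo rest (out ++ [raw]) 0
        else if PySem.Str.startswith ln ">" = true then pvBGo rest out 1
        else none
      else
        if ln = "---" then pvBGo rest out 2
        else if PySem.Str.startswith ln "# " = true then pvBGo rest (out ++ [raw]) 1
        else if ln = "" ∨ PySem.Str.startswith ln ">" = true then pvBGo rest out 1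
        else none

def strip_blockquote_header_alt (lines : List String) : List String :=
  match pvBGo lines [] 0 with
  | none => lines
  | some out => out

-- ===== PRECONDITION & SPEC =====
def Spec_strip_blockquote_header (lines : List String) (out : List String) : Prop := out = strip_blockquote_header_alt lines
instance (lines : List String) (out : List String) : Decidable (Spec_strip_blockquote_header lines out) := by unfold Spec_strip_blockquote_header; infer_instance

-- ===== CLAIM (what is proved, stated in full; the proofs are below) =====
def Claim_equal_strip_blockquote_header : Prop := ∀ (lines : List String), Dom_strip_blockquote_header lines → Spec_strip_blockquote_header lines (strip_blockquote_header lines)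

-- ===== LEMMAS AND PROOFS =====

-- line classification (on the stripped line)
abbrev pvSkip1 (s : String) : Prop :=
  PySem.Str.strip s = "" ∨ PySem.Str.startswith (PySem.Str.strip s) "# " = true
abbrev pvBq (s : String) : Prop := PySem.Str.startswith (PySem.Str.strip s) ">" = true
abbrev pvSkip2 (s : String) : Prop := pvSkip1 s ∨ pvBq s

-- string facts about startswith on '# ', '>' and '---'
lemma pv_sw_head {t : String} {c : Char} {p : List Char}
    (h : PySem.Str.startswith t (String.ofList (c :: p)) = true) :
    ∃ r, t.toList = c :: r := by
  simp only [PySem.Str.startswith_eq, String.toList_ofList] at h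
  rw [PySem.Chars.startswith_iff] at h
  rcases h with ⟨u, hu⟩
  exact ⟨p ++ u, by simpa using hu.symm⟩

lemma pv_hash_ne_empty {t : String} (h : PySem.Str.startswith t "# " = true) : t ≠ "" := by
  obtain ⟨r, hr⟩ := pv_sw_head (t := t) (c := '#') (p := [' ']) h
  intro he; rw [he] at hr; simp at hr

lemma pv_hash_not_gt {t : String} (h : PySem.Str.startswith t "# " = true) :
    PySem.Str.startswith t ">" = false := by
  obtain ⟨r, hr⟩ := pv_sw_head (t := t) (c := '#') (p := [' ']) h
  simp only [PySem.Str.startswith_eq]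
  rw [hr]; simp [PySem.Chars.startswith, List.isPrefixOf]

lemma pv_gt_ne_empty {t : String} (h : PySem.Str.startswith t ">" = true) : t ≠ "" := by
  obtain ⟨r, hr⟩ := pv_sw_head (t := t) (c := '>') (p := []) h
  intro he; rw [he] at hr; simp at hr

lemma pv_gt_not_hash {t : String} (h : PySem.Str.startswith t ">" = true) :
    PySem.Str.startswith t "# " = false := by
  obtain ⟨r, hr⟩ := pv_sw_head (t := t) (c := '>') (p := []) h
  simp only [PySem.Str.startswith_eq]
  rw [hr]; simp [PySem.Chars.startswith, List.isPrefixOf]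

lemma pv_gt_ne_hr {t : String} (h : PySem.Str.startswith t ">" = true) : t ≠ "---" := by
  intro he; rw [he] at h
  simp [PySem.Str.startswith_eq, PySem.Chars.startswith, List.isPrefixOf] at h

lemma pv_hash_ne_hr {t : String} (h : PySem.Str.startswith t "# " = true) : t ≠ "---" := by
  intro he; rw [he] at h
  simp [PySem.Str.startswith_eq, PySem.Chars.startswith, List.isPrefixOf] at h

lemma pv_bq_not_skip1 {t : String} (h : pvBq t) : ¬ pvSkip1 t := by
  rintro (he | hh)
  · exact pv_gt_ne_empty h he
  · rw [pv_gt_not_hash h] at hh; cases hh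

-- pvStripLoop: past the end everything is kept
lemma pv_SL_stop : ∀ (l : List String) (i e : Nat) (b : Bool), e ≤ i → pvStripLoop l i e b = l := by
  intro l
  induction l with
  | nil => intro i e b _; rfl
  | cons x rest ih =>
    intro i e b h
    simp only [pvStripLoop, if_pos h]
    rw [ih (i+1) e b (by omega)]

-- pvStripLoop: shift index and end together
lemma pv_SL_shift : ∀ (l : List String) (i e : Nat) (b : Bool),
    pvStripLoop l (i+1) (e+1) b = pvStripLoop l i e b := by
  intro l
  induction l with
  | nil => intro i e b; rfl
  | cons x rest ih =>
    intro i e b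
    simp only [pvStripLoop]
    by_cases h : e ≤ i
    · rw [if_pos (by omega : e + 1 ≤ i + 1), if_pos h, ih]
    · rw [if_neg (by omega : ¬ (e + 1 ≤ i + 1)), if_neg h]
      split_ifs <;> rw [ih]

-- pvFindEnd skips skip1 lines in any phase
lemma pv_FE1_skip : ∀ (p : List String), (∀ x ∈ p, pvSkip1 x) →
    ∀ (l : List String) (i : Nat) (b : Bool), pvFindEnd (p ++ l) i b = pvFindEnd l (i + p.length) b := by
  intro p
  induction p with
  | nil => intro _ l i b; simp
  | cons x rest ih =>
    intro hp l i b
    have hx : pvSkip1 x := hp x List.mem_cons_self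
    simp only [List.cons_append, pvFindEnd, if_pos hx]
    rw [ih (fun y hy => hp y (List.mem_cons_of_mem _ hy)) l (i+1) b]
    simp only [List.length_cons]
    congr 1; omega

-- pvFindEnd in phase true skips skip2 lines
lemma pv_FE2_skip : ∀ (m : List String), (∀ x ∈ m, pvSkip2 x) →
    ∀ (l : List String) (i : Nat), pvFindEnd (m ++ l) i true = pvFindEnd l (i + m.length) true := by
  intro m
  induction m with
  | nil => intro _ l i; simp
  | cons x rest ih =>
    intro hm l i
    have ihx := ih (fun y hy => hm y (List.mem_cons_of_mem _ hy)) l (i+1)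
    have harith : i + 1 + rest.length = i + (x :: rest).length := by
      simp only [List.length_cons]; omega
    rcases hm x List.mem_cons_self with h1 | h2
    · simp only [List.cons_append, pvFindEnd, if_pos h1]
      rw [ihx, harith]
    · simp only [List.cons_append, pvFindEnd]
      rw [if_neg (pv_bq_not_skip1 h2), if_pos h2, ihx, harith]

-- decomposition ⇒ pvFindEnd finds the end of the block
lemma pv_FE_some (p m rest : List String) (q h : String)
    (hp : ∀ x ∈ p, pvSkip1 x) (hq : pvBq q) (hm : ∀ x ∈ m, pvSkip2 x)
    (hh : PySem.Str.strip h = "---") :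
    pvFindEnd (p ++ q :: (m ++ h :: rest)) 0 false = some (p.length + m.length + 2) := by
  rw [pv_FE1_skip p hp]
  simp only [pvFindEnd]
  rw [if_neg (pv_bq_not_skip1 hq), if_pos hq]
  rw [pv_FE2_skip m hm]
  simp only [pvFindEnd, hh]
  rw [if_neg (by decide : ¬(("---" : String) = "" ∨ PySem.Str.startswith "---" "# " = true)),
      if_neg (by decide : ¬ PySem.Str.startswith "---" ">" = true),
      if_pos (by simp)]
  congr 1
  omega

-- inversion of the phase-true search
lemma pv_FE2_inv : ∀ (l : List String) (i e : Nat), pvFindEnd l i true = some e →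
    ∃ m h rest, l = m ++ h :: rest ∧ (∀ x ∈ m, pvSkip2 x) ∧ PySem.Str.strip h = "---" ∧
      e = i + m.length + 1 := by
  intro l
  induction l with
  | nil => intro i e h; simp [pvFindEnd] at h
  | cons x rest ih =>
    intro i e hfe
    simp only [pvFindEnd] at hfe
    by_cases h1 : PySem.Str.strip x = "" ∨ PySem.Str.startswith (PySem.Str.strip x) "# " = true
    · rw [if_pos h1] at hfe
      obtain ⟨m, h, r, hl, hm, hh, he⟩ := ih (i+1) e hfe
      refine ⟨x :: m, h, r, by rw [hl]; rfl, ?_, hh, by simp only [List.length_cons]; omega⟩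
      intro y hy
      rcases List.mem_cons.mp hy with rfl | hy
      · exact Or.inl h1
      · exact hm y hy
    · rw [if_neg h1] at hfe
      by_cases h2 : PySem.Str.startswith (PySem.Str.strip x) ">" = true
      · rw [if_pos h2] at hfe
        obtain ⟨m, h, r, hl, hm, hh, he⟩ := ih (i+1) e hfe
        refine ⟨x :: m, h, r, by rw [hl]; rfl, ?_, hh, by simp only [List.length_cons]; omega⟩
        intro y hy
        rcases List.mem_cons.mp hy with rfl | hy
        · exact Or.inr h2
        · exact hm y hy
      · rw [if_neg h2] at hfe
        by_cases h3 : PySem.Str.strip x = "---"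
        · rw [if_pos (by simp [h3])] at hfe
          refine ⟨[], x, rest, rfl, by simp, h3, ?_⟩
          simp only [Option.some.injEq] at hfe
          simp only [List.length_nil]
          omega
        · rw [if_neg (by simp [h3])] at hfe
          cases hfe

-- inversion of the phase-false search
lemma pv_FE1_inv : ∀ (l : List String) (i e : Nat), pvFindEnd l i false = some e →
    ∃ p q rest2, l = p ++ q :: rest2 ∧ (∀ x ∈ p, pvSkip1 x) ∧ pvBq q ∧
      pvFindEnd rest2 (i + p.length + 1) true = some e := by
  intro l
  induction l with
  | nil => intro i e h; simp [pvFindEnd] at h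
  | cons x rest ih =>
    intro i e hfe
    simp only [pvFindEnd] at hfe
    by_cases h1 : PySem.Str.strip x = "" ∨ PySem.Str.startswith (PySem.Str.strip x) "# " = true
    · rw [if_pos h1] at hfe
      obtain ⟨p, q, r, hl, hp, hq, hr⟩ := ih (i+1) e hfe
      refine ⟨x :: p, q, r, by rw [hl]; rfl, ?_, hq, ?_⟩
      · intro y hy
        rcases List.mem_cons.mp hy with rfl | hy
        · exact h1
        · exact hp y hy
      · have : i + (x :: p).length + 1 = i + 1 + p.length + 1 := by
          simp only [List.length_cons]; omega
        rw [this]; exact hr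
    · rw [if_neg h1] at hfe
      by_cases h2 : PySem.Str.startswith (PySem.Str.strip x) ">" = true
      · rw [if_pos h2] at hfe
        exact ⟨[], x, rest, rfl, by simp, h2, by simpa using hfe⟩
      · rw [if_neg h2, if_neg (by simp)] at hfe
        cases hfe

-- second pass keeps the skip1 prefix verbatim
lemma pv_SL_p : ∀ (p : List String), (∀ x ∈ p, pvSkip1 x) →
    ∀ (l : List String) (e : Nat),
      pvStripLoop (p ++ l) 0 (p.length + e) false = p ++ pvStripLoop l 0 e false := by
  intro p
  induction p with
  | nil => intro _ l e; simp
  | cons x rest ih =>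
    intro hp l e
    have hx : pvSkip1 x := hp x List.mem_cons_self
    have hgt : PySem.Str.startswith (PySem.Str.strip x) ">" = false := by
      rcases hx with h1 | h1
      · rw [h1]; decide
      · exact pv_hash_not_gt h1
    simp only [List.cons_append, pvStripLoop]
    rw [if_neg (by simp only [List.length_cons]; omega), if_neg (by rw [hgt]; decide),
        if_neg (by rintro ⟨hc, -⟩; cases hc), if_neg (by rintro ⟨hc, -⟩; cases hc)]
    have hlen : (x :: rest).length + e = (rest.length + e) + 1 := by
      simp only [List.length_cons]; omega
    rw [hlen, pv_SL_shift, ih (fun y hy => hp y (List.mem_cons_of_mem _ hy)) l e]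

-- second pass inside the blockquote keeps exactly the '# '-prefixed lines
lemma pv_SL_m : ∀ (m : List String), (∀ x ∈ m, pvSkip2 x) →
    ∀ (l : List String) (e : Nat),
      pvStripLoop (m ++ l) 0 (m.length + e) true
        = m.filter (fun x => PySem.Str.startswith (PySem.Str.strip x) "# ") ++ pvStripLoop l 0 e true := by
  intro m
  induction m with
  | nil => intro _ l e; simp
  | cons x rest ih =>
    intro hm l e
    have ihx := ih (fun y hy => hm y (List.mem_cons_of_mem _ hy)) l e
    have hlen : (x :: rest).length + e = (rest.length + e) + 1 := by
      simp only [List.length_cons]; omega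
    simp only [List.cons_append, pvStripLoop]
    rw [if_neg (by simp only [List.length_cons]; omega)]
    rcases hm x List.mem_cons_self with (h1 | h1) | h2
    · rw [if_neg (by rw [h1]; decide), if_neg (by rintro ⟨-, hc⟩; rw [h1] at hc; exact (by decide : ¬("":String) = "---") hc),
          if_pos (by exact ⟨by trivial, h1⟩), hlen, pv_SL_shift, ihx, List.filter_cons,
          if_neg (by rw [h1]; decide)]
    · rw [if_neg (by rw [pv_hash_not_gt h1]; decide),
          if_neg (by rintro ⟨-, hc⟩; exact pv_hash_ne_hr h1 hc),
          if_neg (by rintro ⟨-, hc⟩; exact pv_hash_ne_empty h1 hc),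
          hlen, pv_SL_shift, ihx, List.filter_cons, if_pos h1]
      rfl
    · rw [if_pos h2, hlen, pv_SL_shift, ihx, List.filter_cons,
          if_neg (by rw [pv_gt_not_hash h2]; decide)]

-- the hr line itself is skipped, everything after kept
lemma pv_SL_h (h : String) (hh : PySem.Str.strip h = "---") (rest : List String) :
    pvStripLoop (h :: rest) 0 1 true = rest := by
  simp only [pvStripLoop]
  rw [if_neg (by omega), if_neg (by rw [hh]; decide), if_pos (by exact ⟨by trivial, hh⟩)]
  exact pv_SL_stop rest 1 1 true (by omega)

-- A's value on a decomposed input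
lemma pv_A_value (p m rest : List String) (q h : String)
    (hp : ∀ x ∈ p, pvSkip1 x) (hq : pvBq q) (hm : ∀ x ∈ m, pvSkip2 x)
    (hh : PySem.Str.strip h = "---") :
    strip_blockquote_header (p ++ q :: (m ++ h :: rest))
      = p ++ (m.filter (fun x => PySem.Str.startswith (PySem.Str.strip x) "# ") ++ rest) := by
  unfold strip_blockquote_header
  rw [pv_FE_some p m rest q h hp hq hm hh]
  show pvStripLoop (p ++ q :: (m ++ h :: rest)) 0 (p.length + m.length + 2) false = _
  have h1 : p.length + m.length + 2 = p.length + (m.length + 2) := by omega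
  rw [h1, pv_SL_p p hp]
  simp only [pvStripLoop]
  rw [if_neg (by omega), if_pos hq]
  have h2 : m.length + 2 = (m.length + 1) + 1 := rfl
  rw [h2, pv_SL_shift, pv_SL_m m hm (h :: rest) 1, pv_SL_h h hh rest]

-- B: in state 2 everything left is appended
lemma pv_BG2 : ∀ (l out : List String), pvBGo l out 2 = some (out ++ l) := by
  intro l
  induction l with
  | nil => intro out; simp [pvBGo]
  | cons x rest ih =>
    intro out
    simp only [pvBGo, if_true]
    rw [ih]
    simp

-- B: state 0 keeps the skip1 prefix in the accumulator
lemma pv_BG0_skip : ∀ (p : List String), (∀ x ∈ p, pvSkip1 x) →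
    ∀ (l out : List String), pvBGo (p ++ l) out 0 = pvBGo l (out ++ p) 0 := by
  intro p
  induction p with
  | nil => intro _ l out; simp
  | cons x rest ih =>
    intro hp l out
    have hx : pvSkip1 x := hp x List.mem_cons_self
    simp only [List.cons_append, pvBGo]
    rw [if_pos trivial, if_pos hx,
        ih (fun y hy => hp y (List.mem_cons_of_mem _ hy)) l (out ++ [x])]
    simp

-- B: state 1 accumulates exactly the '# '-prefixed lines of a skip2 segment
lemma pv_BG1_skip : ∀ (m : List String), (∀ x ∈ m, pvSkip2 x) →
    ∀ (l out : List String),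
      pvBGo (m ++ l) out 1
        = pvBGo l (out ++ m.filter (fun x => PySem.Str.startswith (PySem.Str.strip x) "# ")) 1 := by
  intro m
  induction m with
  | nil => intro _ l out; simp
  | cons x rest ih =>
    intro hm l out
    have ihx := ih (fun y hy => hm y (List.mem_cons_of_mem _ hy)) l
    simp only [List.cons_append, pvBGo]
    rw [if_neg (by omega : ¬(1:Nat) = 2), if_neg (by omega : ¬(1:Nat) = 0)]
    rcases hm x List.mem_cons_self with (h1 | h1) | h2
    · rw [if_neg (by rw [h1]; decide), if_neg (by rw [h1]; decide),
          if_pos (Or.inl h1), ihx, List.filter_cons, if_neg (by rw [h1]; decide)]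
    · rw [if_neg (pv_hash_ne_hr h1), if_pos h1, ihx, List.filter_cons, if_pos h1]
      simp
    · rw [if_neg (pv_gt_ne_hr h2), if_neg (by rw [pv_gt_not_hash h2]; decide),
          if_pos (Or.inr h2), ihx, List.filter_cons,
          if_neg (by rw [pv_gt_not_hash h2]; decide)]

-- B's value on a decomposed input
lemma pv_B_value (p m rest : List String) (q h : String)
    (hp : ∀ x ∈ p, pvSkip1 x) (hq : pvBq q) (hm : ∀ x ∈ m, pvSkip2 x)
    (hh : PySem.Str.strip h = "---") :
    strip_blockquote_header_alt (p ++ q :: (m ++ h :: rest))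
      = p ++ (m.filter (fun x => PySem.Str.startswith (PySem.Str.strip x) "# ") ++ rest) := by
  unfold strip_blockquote_header_alt
  rw [pv_BG0_skip p hp]
  simp only [pvBGo]
  rw [if_pos trivial, if_neg (pv_bq_not_skip1 hq), if_pos hq,
      pv_BG1_skip m hm]
  simp only [pvBGo]
  rw [if_neg (by omega : ¬(1:Nat) = 2), if_neg (by omega : ¬(1:Nat) = 0), if_pos hh, pv_BG2]
  simp

-- if A's phase-true search fails, B's state-1 scan returns none
lemma pv_BG1_none : ∀ (l : List String) (i : Nat) (out : List String),
    pvFindEnd l i true = none → pvBGo l out 1 = none := by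
  intro l
  induction l with
  | nil => intro i out _; rfl
  | cons x rest ih =>
    intro i out hfe
    simp only [pvFindEnd] at hfe
    simp only [pvBGo]
    rw [if_neg (by omega : ¬(1:Nat) = 2), if_neg (by omega : ¬(1:Nat) = 0)]
    by_cases h1 : PySem.Str.strip x = "" ∨ PySem.Str.startswith (PySem.Str.strip x) "# " = true
    · rw [if_pos h1] at hfe
      have hnhr : PySem.Str.strip x ≠ "---" := by
        rcases h1 with h | h
        · rw [h]; decide
        · exact pv_hash_ne_hr h
      rw [if_neg hnhr]
      rcases h1 with h | h
      · rw [if_neg (by rw [h]; decide), if_pos (Or.inl h)]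
        exact ih (i+1) out hfe
      · rw [if_pos h]
        exact ih (i+1) _ hfe
    · rw [if_neg h1] at hfe
      by_cases h2 : PySem.Str.startswith (PySem.Str.strip x) ">" = true
      · rw [if_pos h2] at hfe
        rw [if_neg (pv_gt_ne_hr h2), if_neg (by rw [pv_gt_not_hash h2]; decide),
            if_pos (Or.inr h2)]
        exact ih (i+1) out hfe
      · rw [if_neg h2] at hfe
        by_cases h3 : PySem.Str.strip x = "---"
        · rw [if_pos (by exact ⟨trivial, h3⟩)] at hfe; cases hfe
        · rw [if_neg h3, if_neg (by intro hc; exact h1 (Or.inr hc)),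
              if_neg (by rintro (hc | hc); exacts [h1 (Or.inl hc), h2 hc])]

-- if A's phase-false search fails, B's state-0 scan returns none
lemma pv_BG0_none : ∀ (l : List String) (i : Nat) (out : List String),
    pvFindEnd l i false = none → pvBGo l out 0 = none := by
  intro l
  induction l with
  | nil => intro i out _; rfl
  | cons x rest ih =>
    intro i out hfe
    simp only [pvFindEnd] at hfe
    simp only [pvBGo]
    rw [if_pos trivial]
    by_cases h1 : PySem.Str.strip x = "" ∨ PySem.Str.startswith (PySem.Str.strip x) "# " = true
    · rw [if_pos h1] at hfe
      rw [if_pos h1]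
      exact ih (i+1) _ hfe
    · rw [if_neg h1] at hfe
      rw [if_neg h1]
      by_cases h2 : PySem.Str.startswith (PySem.Str.strip x) ">" = true
      · rw [if_pos h2] at hfe
        rw [if_pos h2]
        exact pv_BG1_none rest (i+1) out hfe
      · rw [if_neg h2, if_neg (by simp)]

-- the two ports agree on every input
lemma pv_main (lines : List String) :
    strip_blockquote_header lines = strip_blockquote_header_alt lines := by
  cases hFE : pvFindEnd lines 0 false with
  | some e =>
    obtain ⟨p, q, rest2, hl, hp, hq, h2⟩ := pv_FE1_inv lines 0 e hFE
    obtain ⟨m, h, rest, hr2, hm, hh, he⟩ := pv_FE2_inv rest2 (0 + p.length + 1) e h2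
    subst hr2; subst hl
    rw [pv_A_value p m rest q h hp hq hm hh, pv_B_value p m rest q h hp hq hm hh]
  | none =>
    have hA : strip_blockquote_header lines = lines := by
      unfold strip_blockquote_header; rw [hFE]
    have hB : strip_blockquote_header_alt lines = lines := by
      unfold strip_blockquote_header_alt
      rw [pv_BG0_none lines 0 [] hFE]
    rw [hA, hB]

-- ===== VERDICT (by name: the statement is the Claim_ definition above) =====
theorem strip_blockquote_header_spec : Claim_equal_strip_blockquote_header := by
  intro lines _
  show strip_blockquote_header lines = strip_blockquote_header_alt lines
  exact pv_main lines
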